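-- pv_equiv track=rewrite | github.com/MouseLand/cellpose | cellpose/contrib/block_utils.py | prepare_blocksize
-- ===== SOURCE A (Python) =====
-- from typing import Tuple, List
--
-- def prepare_blocksize(shape: Tuple[int, ...]|List[int],
--                       blocksize: Tuple[int, ...]|List[int]) -> List[int]:
--     ndim = len(shape)
--     blocksize_ndim = len(blocksize)
--     final_blocksize = []
--
--     # the blocksize may have fewer elements than the image shape
--     # in that case we right align it to shape
--     # if somehow blocksize has more elements than shape
--     # we drop the first elements until the sizes match
--     offset = ndim - blocksize_ndim
--
--     for si in range(ndim):
--         final_blocksize.append(shape[si] if si < offset else blocksize[si - offset])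
--
--     return final_blocksize
-- ===== SOURCE B (Python) =====
-- def prepare_blocksize(shape, blocksize):
--     ndim = len(shape)
--     blocksize_ndim = len(blocksize)
--     if blocksize_ndim <= ndim:
--         # right-align: shape-derived prefix, then the whole blocksize
--         return list(shape[:ndim - blocksize_ndim]) + list(blocksize)
--     # blocksize longer than shape: drop its first elements
--     return list(blocksize[blocksize_ndim - ndim:])
-- ===== Notes on version B (the rewrite author's own statement) =====
-- stated objective: simpler
-- what changed: Replaces the per-index loop with its branch by a single length comparison and two slice/concatenation cases (shape-derived prefix + blocksize, or blocksize tail).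
import Mathlib
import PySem

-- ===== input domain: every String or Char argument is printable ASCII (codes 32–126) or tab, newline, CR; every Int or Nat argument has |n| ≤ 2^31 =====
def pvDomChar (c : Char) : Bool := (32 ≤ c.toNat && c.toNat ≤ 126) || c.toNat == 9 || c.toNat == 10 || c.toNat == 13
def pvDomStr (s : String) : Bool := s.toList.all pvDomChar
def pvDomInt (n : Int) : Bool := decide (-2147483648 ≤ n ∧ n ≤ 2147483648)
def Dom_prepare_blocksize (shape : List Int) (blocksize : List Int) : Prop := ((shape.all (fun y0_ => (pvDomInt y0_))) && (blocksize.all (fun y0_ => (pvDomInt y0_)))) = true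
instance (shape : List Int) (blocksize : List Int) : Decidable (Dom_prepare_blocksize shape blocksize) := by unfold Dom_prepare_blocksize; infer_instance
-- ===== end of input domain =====

-- B replaces A's per-index loop-with-branch by one length comparison and two slice/concatenation cases (simpler).

-- ===== PORT A =====
def prepare_blocksize (shape : List Int) (blocksize : List Int) : List Int :=
  let ndim : Int := shape.length
  let blocksize_ndim : Int := blocksize.length
  let offset := ndim - blocksize_ndim
  (PySem.List.pyRange 0 ndim 1).foldl
    (fun acc si =>
      acc ++ [if si < offset then PySem.List.pyGetD shape si 0
              else PySem.List.pyGetD blocksize (si - offset) 0]) []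

-- ===== PORT B =====
def prepare_blocksize_alt (shape : List Int) (blocksize : List Int) : List Int :=
  if blocksize.length ≤ shape.length then
    shape.take (shape.length - blocksize.length) ++ blocksize
  else
    blocksize.drop (blocksize.length - shape.length)

-- ===== PRECONDITION & SPEC =====
def Spec_prepare_blocksize (shape : List Int) (blocksize : List Int) (out : List Int) : Prop := out = prepare_blocksize_alt shape blocksize
instance (shape : List Int) (blocksize : List Int) (out : List Int) : Decidable (Spec_prepare_blocksize shape blocksize out) := by unfold Spec_prepare_blocksize; infer_instance

-- ===== CLAIM (what is proved, stated in full; the proofs are below) =====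
def Claim_equal_prepare_blocksize : Prop := ∀ (shape : List Int) (blocksize : List Int), Dom_prepare_blocksize shape blocksize → Spec_prepare_blocksize shape blocksize (prepare_blocksize shape blocksize)

-- ===== LEMMAS AND PROOFS =====

-- A's loop is the map of its body over range(ndim).
theorem prepare_blocksize_eq_map (shape blocksize : List Int) :
    prepare_blocksize shape blocksize =
      (PySem.List.pyRange 0 (shape.length : Int) 1).map
        (fun si => if si < (shape.length : Int) - blocksize.length
                   then PySem.List.pyGetD shape si 0
                   else PySem.List.pyGetD blocksize (si - ((shape.length : Int) - blocksize.length)) 0) := by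
  unfold prepare_blocksize
  simpa using PySem.List.foldl_append_singleton_eq_map _ _ []

theorem length_prepare_blocksize (shape blocksize : List Int) :
    (prepare_blocksize shape blocksize).length = shape.length := by
  rw [prepare_blocksize_eq_map, List.length_map, PySem.List.length_pyRange_one]
  omega

theorem length_prepare_blocksize_alt (shape blocksize : List Int) :
    (prepare_blocksize_alt shape blocksize).length = shape.length := by
  unfold prepare_blocksize_alt
  split <;> simp <;> omega

-- ===== VERDICT (by name: the statement is the Claim_ definition above) =====
theorem prepare_blocksize_spec : Claim_equal_prepare_blocksize := by
  intro shape blocksize _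
  unfold Spec_prepare_blocksize
  apply List.ext_getElem
  · rw [length_prepare_blocksize, length_prepare_blocksize_alt]
  intro i h1 h2
  rw [length_prepare_blocksize] at h1
  simp only [prepare_blocksize_eq_map, List.getElem_map, PySem.List.getElem_pyRange_one]
  unfold prepare_blocksize_alt
  by_cases hle : blocksize.length ≤ shape.length
  · simp only [if_pos hle]
    by_cases hlt : (0 : Int) + i < (shape.length : Int) - blocksize.length
    · rw [if_pos hlt]
      rw [PySem.List.pyGetD_eq_getElem _ _ (by omega) (by omega)]
      rw [List.getElem_append_left (by simp; omega)]
      simp only [List.getElem_take]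
      congr 1
      omega
    · rw [if_neg hlt]
      rw [PySem.List.pyGetD_eq_getElem _ _ (by omega) (by omega)]
      rw [List.getElem_append_right (by simp; omega)]
      congr 1
      simp only [List.length_take]
      omega
  · simp only [if_neg hle]
    rw [if_neg (by omega)]
    rw [PySem.List.pyGetD_eq_getElem _ _ (by omega) (by omega)]
    rw [List.getElem_drop]
    congr 1
    omega
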